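-- pv_equiv track=rewrite | github.com/huixu11/paxos-2pc | benchmark_generator.py | generate_shard_map
-- ===== SOURCE A (Python) =====
-- def generate_shard_map(num_clusters: int, total_keys: int) -> dict:
--     """Match paxos_p3.da range partitioning."""
--     keys_per_shard = total_keys // num_clusters
--     shard_map = {}
--     for i in range(1, num_clusters + 1):
--         lo = (i - 1) * keys_per_shard + 1
--         hi = i * keys_per_shard if i < num_clusters else total_keys
--         shard_map[i] = (lo, hi)
--     return shard_map
-- ===== SOURCE B (Python) =====
-- def generate_shard_map(num_clusters: int, total_keys: int) -> dict:
--     """Cumulative boundary table, then pair consecutive boundaries."""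
--     keys_per_shard = total_keys // num_clusters
--     boundaries = [0]
--     for _ in range(num_clusters - 1):
--         boundaries.append(boundaries[-1] + keys_per_shard)
--     boundaries.append(total_keys)
--     return {i: (boundaries[i - 1] + 1, boundaries[i])
--             for i in range(1, num_clusters + 1)}
-- ===== Notes on version B (the rewrite author's own statement) =====
-- stated objective: alternative
-- what changed: Replaces the per-index multiplication with a last-shard branch by a cumulative boundary table built by repeated addition, then a pairing pass over consecutive boundaries; the ZeroDivisionError on num_clusters == 0 is preserved by computing the quotient first.
import Mathlib
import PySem

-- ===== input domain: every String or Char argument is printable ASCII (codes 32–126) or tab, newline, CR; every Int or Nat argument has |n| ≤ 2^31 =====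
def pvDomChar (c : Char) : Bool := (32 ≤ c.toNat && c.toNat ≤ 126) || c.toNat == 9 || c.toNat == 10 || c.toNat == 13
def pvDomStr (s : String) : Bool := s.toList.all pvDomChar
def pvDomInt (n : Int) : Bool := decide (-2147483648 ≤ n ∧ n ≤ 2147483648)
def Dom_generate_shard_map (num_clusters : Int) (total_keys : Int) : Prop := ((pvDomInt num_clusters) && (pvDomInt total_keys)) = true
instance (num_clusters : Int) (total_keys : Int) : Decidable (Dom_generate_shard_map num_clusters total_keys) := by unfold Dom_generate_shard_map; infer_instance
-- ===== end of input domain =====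

-- B builds a cumulative boundary table and pairs consecutive boundaries, instead of A's
-- per-index multiplication with a last-shard branch; same cost (objective: alternative).

-- ===== PORT A =====
def generate_shard_map (num_clusters : Int) (total_keys : Int) : List (Int × Int × Int) :=
  let keys_per_shard := PySem.Int.floordiv total_keys num_clusters
  ((PySem.List.pyRange 1 (num_clusters + 1) 1).foldl
      (fun shard_map i =>
        let lo := (i - 1) * keys_per_shard + 1
        let hi := if i < num_clusters then i * keys_per_shard else total_keys
        PySem.Dict.insert shard_map i (lo, hi))
      PySem.Dict.empty).items

-- ===== PORT B =====
def generate_shard_map_alt (num_clusters : Int) (total_keys : Int) : List (Int × Int × Int) :=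
  let keys_per_shard := PySem.Int.floordiv total_keys num_clusters
  let boundaries :=
    ((PySem.List.pyRange 0 (num_clusters - 1) 1).foldl
        (fun bs _ => bs ++ [PySem.List.pyGetD bs (-1) 0 + keys_per_shard]) [(0 : Int)]) ++ [total_keys]
  -- dict comprehension over fresh keys 1..num_clusters; boundaries[i-1]/boundaries[i] are always in
  -- range there, so pyGetD's default is never read
  ((PySem.List.pyRange 1 (num_clusters + 1) 1).foldl
      (fun d i =>
        PySem.Dict.insert d i (PySem.List.pyGetD boundaries (i - 1) 0 + 1,
                               PySem.List.pyGetD boundaries i 0))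
      PySem.Dict.empty).items

-- ===== PRECONDITION & SPEC =====
-- Pre_ excludes exactly num_clusters = 0, where A raises ZeroDivisionError on '//'.
def Pre_generate_shard_map (num_clusters : Int) (total_keys : Int) : Prop := num_clusters ≠ 0
instance (num_clusters : Int) (total_keys : Int) : Decidable (Pre_generate_shard_map num_clusters total_keys) := by unfold Pre_generate_shard_map; infer_instance
def pvWitness_generate_shard_map : Int × Int := (3, 10)

def Spec_generate_shard_map (num_clusters : Int) (total_keys : Int) (out : List (Int × Int × Int)) : Prop := out = generate_shard_map_alt num_clusters total_keys
instance (num_clusters : Int) (total_keys : Int) (out : List (Int × Int × Int)) : Decidable (Spec_generate_shard_map num_clusters total_keys out) := by unfold Spec_generate_shard_map; infer_instance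

-- ===== CLAIM (what is proved, stated in full; the proofs are below) =====
def Claim_equal_generate_shard_map : Prop := ∀ (num_clusters : Int) (total_keys : Int), Dom_generate_shard_map num_clusters total_keys → Pre_generate_shard_map num_clusters total_keys → Spec_generate_shard_map num_clusters total_keys (generate_shard_map num_clusters total_keys)

-- ===== LEMMAS AND PROOFS =====

-- the boundary-accumulation loop yields the table of multiples of k
lemma boundaries_loop (k : Int) (m : Nat) :
    (List.range m).foldl (fun bs _ => bs ++ [PySem.List.pyGetD bs (-1) 0 + k]) [(0 : Int)]
      = (List.range (m + 1)).map (fun j => Int.ofNat j * k) := by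
  have hmap : ∀ p : Nat, (List.range (p + 1)).map (fun j => Int.ofNat j * k)
      = (List.range p).map (fun j => Int.ofNat j * k) ++ [Int.ofNat p * k] := by
    intro p; rw [List.range_succ, List.map_append]; simp
  induction m with
  | zero => simp
  | succ m ih =>
    rw [List.range_succ, List.foldl_append, ih]
    simp only [List.foldl_cons, List.foldl_nil]
    rw [hmap (m + 1), hmap m, PySem.List.pyGetD_neg_one_append_singleton]
    have hstep : Int.ofNat m * k + k = Int.ofNat (m + 1) * k := by
      simp only [Int.ofNat_eq_natCast]; push_cast; ring
    rw [hstep]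

lemma pos_case (n t : Int) (hn : 1 ≤ n) :
    generate_shard_map n t = generate_shard_map_alt n t := by
  simp only [generate_shard_map, generate_shard_map_alt]
  set k := PySem.Int.floordiv t n with hk
  have hfresh : ∀ a ∈ PySem.List.pyRange 1 (n + 1) 1,
      (PySem.Dict.empty : PySem.Dict Int (Int × Int)).contains ((fun (i : Int) => i) a) = false := by
    intro a _; simp [PySem.Dict.contains_empty]
  have hnd : ((PySem.List.pyRange 1 (n + 1) 1).map (fun (i : Int) => i)).Nodup := by
    simpa using PySem.List.nodup_pyRange_one 1 (n + 1)
  have hA := PySem.Dict.items_foldl_insert_fresh (k := fun (i : Int) => i)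
      (v := fun i => ((i - 1) * k + 1, if i < n then i * k else t))
      (l := PySem.List.pyRange 1 (n + 1) 1) (d := PySem.Dict.empty) hfresh hnd
  have hB := PySem.Dict.items_foldl_insert_fresh (k := fun (i : Int) => i)
      (v := fun i => (PySem.List.pyGetD
          ((PySem.List.pyRange 0 (n - 1) 1).foldl
            (fun bs _ => bs ++ [PySem.List.pyGetD bs (-1) 0 + k]) [(0 : Int)] ++ [t]) (i - 1) 0 + 1,
        PySem.List.pyGetD
          ((PySem.List.pyRange 0 (n - 1) 1).foldl
            (fun bs _ => bs ++ [PySem.List.pyGetD bs (-1) 0 + k]) [(0 : Int)] ++ [t]) i 0))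
      (l := PySem.List.pyRange 1 (n + 1) 1) (d := PySem.Dict.empty) hfresh hnd
  simp only [PySem.Dict.empty, List.nil_append] at hA hB
  simp only [PySem.Dict.empty]
  rw [hA, hB]
  apply List.map_congr_left
  intro i hi
  rw [PySem.List.mem_pyRange_one] at hi
  obtain ⟨hi1, hi2⟩ := hi
  have hb : ((PySem.List.pyRange 0 (n - 1) 1).foldl
      (fun bs _ => bs ++ [PySem.List.pyGetD bs (-1) 0 + k]) [(0 : Int)])
        = (List.range ((n - 1).toNat + 1)).map (fun j => Int.ofNat j * k) := by
    rw [PySem.List.pyRange_one, List.foldl_map, boundaries_loop]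
    norm_num
  rw [hb]
  rw [Prod.mk.injEq, Prod.mk.injEq]
  refine ⟨rfl, ?_, ?_⟩
  · -- lo: boundaries[i-1] + 1 = (i-1)*k + 1
    rw [PySem.List.pyGetD_eq_getElem _ _ (by omega) (by simp; omega)]
    rw [List.getElem_append_left (by simp; omega)]
    simp only [List.getElem_map, List.getElem_range]
    have : (Int.ofNat (i - 1).toNat) = i - 1 := by simp only [Int.ofNat_eq_natCast]; omega
    rw [this]
  · -- hi: boundaries[i] = i*k for i < n, else total_keys
    by_cases hlt : i < n
    · rw [if_pos hlt]
      rw [PySem.List.pyGetD_eq_getElem _ _ (by omega) (by simp; omega)]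
      rw [List.getElem_append_left (by simp; omega)]
      simp only [List.getElem_map, List.getElem_range]
      have : (Int.ofNat i.toNat) = i := by simp only [Int.ofNat_eq_natCast]; omega
      rw [this]
    · rw [if_neg hlt]
      rw [PySem.List.pyGetD_eq_getElem _ _ (by omega) (by simp; omega)]
      rw [List.getElem_append_right (by simp; omega)]
      simp

lemma nonpos_case (n t : Int) (hn : n ≤ 0) :
    generate_shard_map n t = generate_shard_map_alt n t := by
  simp only [generate_shard_map, generate_shard_map_alt]
  have h : PySem.List.pyRange 1 (n + 1) 1 = [] := by
    rw [PySem.List.pyRange_one]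
    have h0 : (n + 1 - 1).toNat = 0 := by omega
    rw [h0]
    rfl
  simp [h, PySem.Dict.empty]

-- ===== VERDICT (by name: the statement is the Claim_ definition above) =====
theorem generate_shard_map_spec : Claim_equal_generate_shard_map := by
  intro n t _ _
  unfold Spec_generate_shard_map
  by_cases h : n ≤ 0
  · exact nonpos_case n t h
  · exact pos_case n t (by omega)
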